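-- pv_equiv track=rewrite | github.com/Nighttone4478/Python_Basic_Notes | 例題/期中考歷屆/python_code/Q05.py | iscontinue
-- ===== SOURCE A (Python) =====
-- def iscontinue(points):
--     points = sorted(points)
--
--     if 1 in points and 13 in points:
--         while min(points) < 9:
--             points[0] += 13
--             points = sorted(points)
--     if all(points[i] + 1 == points[i+1] for i in range(len(points)-1)): return True
--     return False
-- ===== SOURCE B (Python) =====
-- def iscontinue(points):
--     if 1 in points and 13 in points:
--         points = [x if x >= 9 else x + 13 * ((21 - x) // 13) for x in points]
--     points = sorted(points)
--     return all(a + 1 == b for a, b in zip(points, points[1:]))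
-- ===== Notes on version B (the rewrite author's own statement) =====
-- stated objective: alternative
-- what changed: A's while-loop that repeatedly bumps the minimum by 13 and re-sorts is replaced by a closed-form per-element lift (x -> x + 13*ceil((9-x)/13) for x < 9) computed in one pass, followed by a single sort and a single adjacent-pair scan via zip instead of A's index-based scan.
import Mathlib
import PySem

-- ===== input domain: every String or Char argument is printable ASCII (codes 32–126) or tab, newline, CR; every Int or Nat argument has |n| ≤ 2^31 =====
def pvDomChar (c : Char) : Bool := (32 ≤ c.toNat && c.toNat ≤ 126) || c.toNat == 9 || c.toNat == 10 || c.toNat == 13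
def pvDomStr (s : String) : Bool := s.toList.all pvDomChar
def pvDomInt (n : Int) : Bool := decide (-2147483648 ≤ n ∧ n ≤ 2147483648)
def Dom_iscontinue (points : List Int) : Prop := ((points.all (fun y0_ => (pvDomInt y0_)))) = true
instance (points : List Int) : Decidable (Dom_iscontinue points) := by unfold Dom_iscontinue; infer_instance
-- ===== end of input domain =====

-- B replaces A's repeated bump-and-resort while-loop by a closed-form lift of each
-- element below 9, one sort and a single adjacent-pair scan (objective: alternative).

-- ===== PORT A =====
-- the while loop: 'while min(points) < 9: points[0] += 13; points = sorted(points)'.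
-- The list is sorted at every entry (Python re-sorts in the body and the caller sorts
-- first); the Pairwise argument carries that invariant for termination.
def iscontinueLoopA (points : List Int) (hs : points.Pairwise (· ≤ ·)) : List Int :=
  if hc : (PySem.List.min? points (fun x => x)).getD 9 < 9 then
    match points, hs, hc with
    | [], _, hc => absurd hc (by simp [PySem.List.min?])
    | p :: rest, hsp, hlt =>
        iscontinueLoopA (PySem.List.sorted ((p + 13) :: rest) (fun x => x) false)
          (PySem.List.sorted_pairwise _ _)
  else points
termination_by ((points.map (fun x => (9 - x).toNat)).sum)
decreasing_by
  have hperm : (PySem.List.sorted ((p + 13) :: rest) (fun x => x) false).Perm ((p + 13) :: rest) :=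
    PySem.List.sorted_perm _ _ _
  have hsum : ((PySem.List.sorted ((p + 13) :: rest) (fun x => x) false).map
      (fun x => (9 - x).toNat)).sum = (((p + 13) :: rest).map (fun x => (9 - x).toNat)).sum :=
    (hperm.map _).sum_eq
  -- head p is ≤ the minimum m, and m < 9, hence p < 9
  have hp9 : p < 9 := by
    rcases hmin : PySem.List.min? (p :: rest) (fun x => x) with _ | m
    · simp [PySem.List.min?_eq_none_iff] at hmin
    · have hmem : m ∈ p :: rest := PySem.List.min?_mem hmin
      have hle : p ≤ m := by
        rcases List.mem_cons.1 hmem with h | h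
        · omega
        · exact (List.pairwise_cons.1 hsp).1 m h
      rw [hmin] at hlt
      simp only [Option.getD_some] at hlt
      omega
  simp only [hsum, List.map_cons, List.sum_cons]
  omega

def iscontinue (points : List Int) : Bool :=
  let pts := PySem.List.sorted points (fun x => x) false
  let pts2 := if pts.contains 1 && pts.contains 13 then
      iscontinueLoopA pts (PySem.List.sorted_pairwise _ _)
    else pts
  if (PySem.List.pyRange 0 ((pts2.length : Int) - 1) 1).all
      (fun i => PySem.List.pyGetD pts2 i 0 + 1 == PySem.List.pyGetD pts2 (i + 1) 0)
  then true else false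

-- ===== PORT B =====
def iscontinue_alt (points : List Int) : Bool :=
  let pts := if points.contains 1 && points.contains 13 then
      points.map (fun x => if 9 ≤ x then x else x + 13 * PySem.Int.floordiv (21 - x) 13)
    else points
  let s := PySem.List.sorted pts (fun x => x) false
  (s.zip (PySem.List.slice s (some 1) none)).all (fun ab => ab.1 + 1 == ab.2)

-- ===== PRECONDITION & SPEC =====
def Spec_iscontinue (points : List Int) (out : Bool) : Prop := out = iscontinue_alt points
instance (points : List Int) (out : Bool) : Decidable (Spec_iscontinue points out) := by unfold Spec_iscontinue; infer_instance

-- ===== CLAIM (what is proved, stated in full; the proofs are below) =====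
def Claim_equal_iscontinue : Prop := ∀ (points : List Int), Dom_iscontinue points → Spec_iscontinue points (iscontinue points)

-- ===== LEMMAS AND PROOFS =====

-- B's closed-form lift of one element
def pvLift (x : Int) : Int := if 9 ≤ x then x else x + 13 * PySem.Int.floordiv (21 - x) 13

theorem pvLift_of_ge {x : Int} (h : 9 ≤ x) : pvLift x = x := by simp [pvLift, h]

theorem pvLift_step {x : Int} (h : x < 9) : pvLift x = pvLift (x + 13) := by
  unfold pvLift
  rw [PySem.Int.floordiv_eq_ediv_of_pos (by omega), PySem.Int.floordiv_eq_ediv_of_pos (by omega)]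
  split_ifs with h1 h2 h2 <;> omega

theorem map_pvLift_of_min_ge (l : List Int) (h : ¬ (PySem.List.min? l (fun x => x)).getD 9 < 9) :
    l.map pvLift = l := by
  cases l with
  | nil => rfl
  | cons a t =>
    rcases hmin : PySem.List.min? (a :: t) (fun x => x) with _ | m
    · simp [PySem.List.min?_eq_none_iff] at hmin
    · have hisMin := PySem.List.min?_isMin hmin
      rw [hmin] at h
      simp only [Option.getD_some] at h
      have : ∀ x ∈ a :: t, pvLift x = x := by
        intro x hx
        exact pvLift_of_ge (le_trans (by omega) (hisMin x hx))
      calc (a :: t).map pvLift = (a :: t).map id := List.map_congr_left (fun x hx => this x hx)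
        _ = a :: t := List.map_id _

-- loop characterization: on a sorted list, A's loop returns sorted(map pvLift l)
theorem loopA_eq_sorted_map (l : List Int) (hs : l.Pairwise (· ≤ ·)) :
    iscontinueLoopA l hs = PySem.List.sorted (l.map pvLift) (fun x => x) false := by
  fun_induction iscontinueLoopA l hs with
  | case1 p rest hsp hlt hsp2 ih =>
      rw [ih]
      refine PySem.List.sorted_eq_sorted_of_perm _ _ _ (fun a b hab => hab) ?_
      have hperm : (PySem.List.sorted ((p + 13) :: rest) (fun x => x) false).Perm ((p + 13) :: rest) :=
        PySem.List.sorted_perm _ _ _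
      have hp9 : p < 9 := by
        rcases hmin : PySem.List.min? (p :: rest) (fun x => x) with _ | m
        · simp [PySem.List.min?_eq_none_iff] at hmin
        · have hmem : m ∈ p :: rest := PySem.List.min?_mem hmin
          have hle : p ≤ m := by
            rcases List.mem_cons.1 hmem with h | h
            · omega
            · exact (List.pairwise_cons.1 hsp).1 m h
          rw [hmin] at hlt
          simp only [Option.getD_some] at hlt
          omega
      have h3 : ((p + 13) :: rest).map pvLift = (p :: rest).map pvLift := by
        simp only [List.map_cons]
        rw [← pvLift_step hp9]
      exact h3 ▸ (hperm.map pvLift)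
  | case2 points hs hc =>
      rw [map_pvLift_of_min_ge points hc,
        PySem.List.sorted_eq_self_of_pairwise _ _ hs]

-- B's adjacent-pair scan equals Chain'
theorem zip_scan_eq_chain' (l : List Int) :
    ((l.zip (l.drop 1)).all (fun ab => ab.1 + 1 == ab.2)) = true ↔
      List.IsChain (fun a b => a + 1 = b) l := by
  induction l with
  | nil => simp
  | cons a t ih =>
    cases t with
    | nil => simp
    | cons b t' =>
      simp only [List.drop_one, List.tail_cons, List.zip_cons_cons, List.all_cons,
        Bool.and_eq_true, beq_iff_eq, List.isChain_cons_cons]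
      simp only [List.drop_one, List.tail_cons] at ih
      exact and_congr Iff.rfl ih

-- A's range-indexed scan equals Chain'
theorem range_scan_eq_chain' (l : List Int) :
    ((PySem.List.pyRange 0 ((l.length : Int) - 1) 1).all
        (fun i => PySem.List.pyGetD l i 0 + 1 == PySem.List.pyGetD l (i + 1) 0)) = true ↔
      List.IsChain (fun a b => a + 1 = b) l := by
  rw [List.isChain_iff_getElem]
  simp only [List.all_eq_true, PySem.List.mem_pyRange_one, beq_iff_eq]
  constructor
  · intro h i hi
    have := h (i : Int) ⟨by omega, by omega⟩
    rw [PySem.List.pyGetD_eq_getElem l 0 (by omega) (by omega)] at this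
    have h2 : ((i : Int) + 1) = ((i + 1 : Nat) : Int) := by push_cast; ring
    rw [h2, PySem.List.pyGetD_eq_getElem l 0 (by omega) (by omega)] at this
    simp only [Int.toNat_natCast] at this
    exact this
  · intro h i ⟨h0, h1⟩
    have hi : i.toNat + 1 < l.length := by omega
    have := h i.toNat hi
    rw [PySem.List.pyGetD_eq_getElem l 0 (by omega) (by omega)]
    have h2 : (i + 1) = ((i.toNat + 1 : Nat) : Int) := by omega
    rw [h2, PySem.List.pyGetD_eq_getElem l 0 (by omega) (by omega)]
    simp only [Int.toNat_natCast]
    exact this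

theorem scan_eq (l : List Int) :
    (if (PySem.List.pyRange 0 ((l.length : Int) - 1) 1).all
        (fun i => PySem.List.pyGetD l i 0 + 1 == PySem.List.pyGetD l (i + 1) 0)
      then true else false) =
    ((l.zip (PySem.List.slice l (some 1) none)).all (fun ab => ab.1 + 1 == ab.2)) := by
  rw [PySem.List.slice_from _ (by omega)]
  simp only [Int.toNat_one]
  have h1 := range_scan_eq_chain' l
  have h2 := zip_scan_eq_chain' l
  by_cases hc : List.IsChain (fun a b => a + 1 = b) l
  · rw [if_pos (h1.mpr hc)]
    exact (h2.mpr hc).symm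
  · rw [if_neg (fun h => hc (h1.mp h))]
    cases hB : ((l.zip (l.drop 1)).all (fun ab => ab.1 + 1 == ab.2)) with
    | false => rfl
    | true => exact absurd (h2.mp hB) hc

-- ===== VERDICT (by name: the statement is the Claim_ definition above) =====
theorem iscontinue_spec : Claim_equal_iscontinue := by
  intro points _
  unfold Spec_iscontinue iscontinue iscontinue_alt
  simp only
  have hmem1 : (PySem.List.sorted points (fun x => x) false).contains 1 = points.contains 1 := by
    simp only [List.contains_eq_mem, PySem.List.mem_sorted]
  have hmem13 : (PySem.List.sorted points (fun x => x) false).contains 13 = points.contains 13 := by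
    simp only [List.contains_eq_mem, PySem.List.mem_sorted]
  rw [hmem1, hmem13]
  by_cases hb : (points.contains 1 && points.contains 13) = true
  · rw [if_pos hb, if_pos hb,
      loopA_eq_sorted_map _ (PySem.List.sorted_pairwise _ _)]
    have hperm : ((PySem.List.sorted points (fun x => x) false).map pvLift).Perm
        (points.map pvLift) := (PySem.List.sorted_perm _ _ _).map _
    rw [PySem.List.sorted_eq_sorted_of_perm _ _ _ (fun a b hab => hab) hperm]
    exact scan_eq _
  · rw [if_neg hb, if_neg hb]
    exact scan_eq _
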